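-- pv_equiv track=rewrite | github.com/s1db/Copeland-Method | iterative_copeland.py | deleteSetOfCandidate
-- ===== SOURCE A (Python) =====
-- def list2matrix(k):
--     # NOTE: Very bad implementation, could possibly just be an equation.
--     # It works though!!
--     r = 1
--     while r*(r-1)/2 <= k:
--         r += 1
--     r = r - 1
--     c = k - (r*(r-1)//2)
--     return (r, c)
--
-- def deleteSetOfCandidate(score_list, indicies):
--     new_score_list = []
--     for i, x in enumerate(score_list):
--         position_in_matrix = list2matrix(i)
--         if position_in_matrix[0] in indicies or position_in_matrix[1] in indicies:
--             pass
--         else: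
--             new_score_list.append(x)
--     return(new_score_list)
-- ===== SOURCE B (Python) =====
-- def deleteSetOfCandidate(score_list, indicies):
--     # One pass with running (row, col) counters over the triangular layout,
--     # instead of re-running list2matrix's while loop for every index.
--     removed = set(indicies)
--     new_score_list = []
--     r, c = 1, 0
--     for x in score_list:
--         if r not in removed and c not in removed:
--             new_score_list.append(x)
--         c += 1
--         if c == r:
--             r += 1
--             c = 0
--     return new_score_list
-- ===== Notes on version B (the rewrite author's own statement) =====
-- stated objective: faster
-- what changed: Replaces the per-index while-loop triangular inversion and linear list membership with a single pass that maintains running (row, col) counters and a precomputed set of removed indices.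
import Mathlib
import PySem

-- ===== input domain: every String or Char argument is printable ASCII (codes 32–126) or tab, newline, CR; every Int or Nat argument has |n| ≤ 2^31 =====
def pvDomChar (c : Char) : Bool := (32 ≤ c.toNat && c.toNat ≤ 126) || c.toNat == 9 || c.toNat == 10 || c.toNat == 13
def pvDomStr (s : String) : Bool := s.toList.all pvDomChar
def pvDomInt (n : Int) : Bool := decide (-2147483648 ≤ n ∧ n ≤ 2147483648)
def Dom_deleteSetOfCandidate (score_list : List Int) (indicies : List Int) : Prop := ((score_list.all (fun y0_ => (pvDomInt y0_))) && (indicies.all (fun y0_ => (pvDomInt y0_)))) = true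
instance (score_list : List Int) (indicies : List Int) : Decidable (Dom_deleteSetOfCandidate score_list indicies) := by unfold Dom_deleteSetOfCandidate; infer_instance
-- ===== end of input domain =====

-- B replaces A's per-index while-loop triangular inversion (list2matrix) and linear list
-- membership by one pass with running (row, col) counters and a precomputed membership set.

-- ===== PORT A =====
-- the while loop of list2matrix; fuel k.toNat + 2 is enough: the loop stops with r ≤ k + 2
-- (Python compares as floats via '/'; exact here, ported as floor division of the even r*(r-1))
def l2mLoop (fuel : Nat) (k : Int) (r : Int) : Int :=
  match fuel with
  | 0 => r
  | fuel + 1 => if PySem.Int.floordiv (r * (r - 1)) 2 ≤ k then l2mLoop fuel k (r + 1) else r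

def list2matrix (k : Int) : Int × Int :=
  let r := l2mLoop (k.toNat + 2) k 1
  let r := r - 1
  let c := k - PySem.Int.floordiv (r * (r - 1)) 2
  (r, c)

-- the body of A's for loop
def dscStepA (indicies : List Int) (new_score_list : List Int) (ix : Int × Int) : List Int :=
  let position_in_matrix := list2matrix ix.1
  if indicies.contains position_in_matrix.1 || indicies.contains position_in_matrix.2
  then new_score_list
  else new_score_list ++ [ix.2]

def deleteSetOfCandidate (score_list : List Int) (indicies : List Int) : List Int :=
  (PySem.List.enumerate score_list 0).foldl (dscStepA indicies) []

-- ===== PORT B =====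
-- the body of B's for loop; state = (new_score_list, r, c)
def dscStepB (removed : PySem.Set Int) (st : List Int × Int × Int) (x : Int) : List Int × Int × Int :=
  let out := if !(PySem.Set.contains removed st.2.1) && !(PySem.Set.contains removed st.2.2)
             then st.1 ++ [x] else st.1
  let c := st.2.2 + 1
  if c = st.2.1 then (out, st.2.1 + 1, 0) else (out, st.2.1, c)

def deleteSetOfCandidate_alt (score_list : List Int) (indicies : List Int) : List Int :=
  let removed := PySem.Set.ofList indicies
  (score_list.foldl (dscStepB removed) ([], 1, 0)).1

-- ===== PRECONDITION & SPEC =====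
def Spec_deleteSetOfCandidate (score_list : List Int) (indicies : List Int) (out : List Int) : Prop := out = deleteSetOfCandidate_alt score_list indicies
instance (score_list : List Int) (indicies : List Int) (out : List Int) : Decidable (Spec_deleteSetOfCandidate score_list indicies out) := by unfold Spec_deleteSetOfCandidate; infer_instance

-- ===== CLAIM (what is proved, stated in full; the proofs are below) =====
def Claim_equal_deleteSetOfCandidate : Prop := ∀ (score_list : List Int) (indicies : List Int), Dom_deleteSetOfCandidate score_list indicies → Spec_deleteSetOfCandidate score_list indicies (deleteSetOfCandidate score_list indicies)

-- ===== LEMMAS AND PROOFS =====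

-- triangular numbers r*(r-1)/2 are monotone in r for 0 ≤ r
theorem tri_mono {a b : Int} (ha : 0 ≤ a) (hab : a ≤ b) :
    PySem.Int.floordiv (a * (a - 1)) 2 ≤ PySem.Int.floordiv (b * (b - 1)) 2 := by
  rw [PySem.Int.floordiv_eq_ediv_of_pos (by norm_num), PySem.Int.floordiv_eq_ediv_of_pos (by norm_num)]
  have h : a * (a - 1) ≤ b * (b - 1) := by
    by_cases ha1 : 1 ≤ a
    · nlinarith [mul_nonneg (sub_nonneg.2 hab) (by omega : (0:Int) ≤ b + a - 1)]
    · have ha0 : a = 0 := by omega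
      subst ha0
      by_cases hb : 1 ≤ b
      · nlinarith
      · have hb0 : b = 0 := by omega
        subst hb0; norm_num
  exact Int.ediv_le_ediv (by norm_num) h

-- the while loop returns the least R+1 ≥ r0 with tri(R+1) > k
theorem l2mLoop_eq (fuel : Nat) : ∀ (k r0 R : Int), 1 ≤ r0 → r0 ≤ R + 1 →
    PySem.Int.floordiv (R * (R - 1)) 2 ≤ k →
    k < PySem.Int.floordiv ((R + 1) * R) 2 →
    R + 1 - r0 < (fuel : Int) →
    l2mLoop fuel k r0 = R + 1 := by
  induction fuel with
  | zero => intro k r0 R h1 h2 _ _ hf; simp at hf; omega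
  | succ n ih =>
    intro k r0 R h1 h2 hR hR1 hf
    by_cases hcase : r0 = R + 1
    · subst hcase
      have : ¬ PySem.Int.floordiv ((R + 1) * (R + 1 - 1)) 2 ≤ k := by
        have : (R + 1) * (R + 1 - 1) = (R + 1) * R := by ring
        rw [this]; omega
      simp only [l2mLoop]
      rw [if_neg this]
    · have hr0R : r0 ≤ R := by omega
      have hcond : PySem.Int.floordiv (r0 * (r0 - 1)) 2 ≤ k :=
        le_trans (tri_mono (by omega) hr0R) hR
      simp only [l2mLoop, hcond, if_pos]
      exact ih k (r0 + 1) R (by omega) (by omega) hR hR1 (by push_cast at hf ⊢; omega)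

-- the per-index inversion: list2matrix is the inverse of the triangular packing
theorem list2matrix_eq (r c : Int) (hr : 1 ≤ r) (hc : 0 ≤ c) (hcr : c < r) :
    list2matrix (PySem.Int.floordiv (r * (r - 1)) 2 + c) = (r, c) := by
  set k : Int := PySem.Int.floordiv (r * (r - 1)) 2 + c with hk
  have htri : 0 ≤ PySem.Int.floordiv (r * (r - 1)) 2 := by
    have h0 : PySem.Int.floordiv (1 * (1 - 1)) 2 ≤ PySem.Int.floordiv (r * (r - 1)) 2 :=
      tri_mono (by norm_num) hr
    simpa using h0
  have hnext : PySem.Int.floordiv ((r + 1) * r) 2 = PySem.Int.floordiv (r * (r - 1)) 2 + r := by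
    have hexp : (r + 1) * r = r * (r - 1) + r * 2 := by ring
    rw [hexp, PySem.Int.floordiv_eq_ediv_of_pos (by norm_num),
        PySem.Int.floordiv_eq_ediv_of_pos (by norm_num), Int.add_mul_ediv_right _ _ (by norm_num)]
  have hk0 : 0 ≤ k := by omega
  have hrk : r ≤ k + 1 := by
    -- r*(r-1) ≥ 2*(r-1) for r ≥ 1, so tri r ≥ r - 1
    have h2 : 2 * (r - 1) ≤ r * (r - 1) := by
      by_cases hr2 : 2 ≤ r
      · nlinarith
      · have hr1 : r = 1 := by omega
        subst hr1; norm_num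
    obtain ⟨p, hp⟩ : ∃ p, r * (r - 1) = p := ⟨_, rfl⟩
    have hk' : k = PySem.Int.floordiv p 2 + c := by rw [hk, hp]
    have htri' : 0 ≤ PySem.Int.floordiv p 2 := by rw [← hp]; exact htri
    rw [hp] at h2
    rw [PySem.Int.floordiv_eq_ediv_of_pos (by norm_num : (0:Int) < 2)] at hk' htri'
    omega
  have hloop : l2mLoop (k.toNat + 2) k 1 = r + 1 :=
    l2mLoop_eq (k.toNat + 2) k 1 r (by omega) (by omega) (by omega) (by omega)
      (by push_cast; omega)
  simp only [list2matrix, hloop]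
  rw [show r + 1 - 1 = r from by ring]
  simp only [Prod.mk.injEq]
  exact ⟨trivial, by omega⟩

-- one step: A's filtering condition at index tri r + c equals B's at state (r, c)
theorem cond_eq (indicies : List Int) (v : Int) :
    PySem.Set.contains (PySem.Set.ofList indicies) v = indicies.contains v := by
  simp [PySem.Set.contains_eq_listContains, PySem.Set.mem_ofList]

-- the loop invariant: folding A over indices starting at tri r + c equals folding B from state (acc, r, c)
theorem fold_eq (indicies : List Int) : ∀ (l acc : List Int) (r c : Int),
    1 ≤ r → 0 ≤ c → c < r →
    (PySem.List.enumerate l (PySem.Int.floordiv (r * (r - 1)) 2 + c)).foldl (dscStepA indicies) acc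
      = (l.foldl (dscStepB (PySem.Set.ofList indicies)) (acc, r, c)).1 := by
  intro l
  induction l with
  | nil => intro acc r c _ _ _; simp [PySem.List.enumerate_nil]
  | cons x xs ih =>
    intro acc r c hr hc hcr
    rw [PySem.List.enumerate_cons, List.foldl_cons, List.foldl_cons]
    have hstepA : dscStepA indicies acc (PySem.Int.floordiv (r * (r - 1)) 2 + c, x)
        = if indicies.contains r || indicies.contains c then acc else acc ++ [x] := by
      simp only [dscStepA, list2matrix_eq r c hr hc hcr]
    set acc' : List Int := if indicies.contains r || indicies.contains c then acc else acc ++ [x]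
      with hacc'
    have hstepB : dscStepB (PySem.Set.ofList indicies) (acc, r, c) x
        = if c + 1 = r then (acc', r + 1, 0) else (acc', r, c + 1) := by
      simp only [dscStepB, cond_eq]
      have : (!indicies.contains r && !indicies.contains c)
          = !(indicies.contains r || indicies.contains c) := by
        cases indicies.contains r <;> cases indicies.contains c <;> rfl
      rw [this, hacc']
      cases (indicies.contains r || indicies.contains c) <;> simp
    rw [hstepA, hstepB]
    by_cases hcr1 : c + 1 = r
    · rw [if_pos hcr1]
      have hidx : PySem.Int.floordiv (r * (r - 1)) 2 + c + 1
          = PySem.Int.floordiv ((r + 1) * (r + 1 - 1)) 2 + 0 := by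
        have hexp : (r + 1) * (r + 1 - 1) = r * (r - 1) + r * 2 := by ring
        rw [hexp, PySem.Int.floordiv_eq_ediv_of_pos (by norm_num),
            PySem.Int.floordiv_eq_ediv_of_pos (by norm_num),
            Int.add_mul_ediv_right _ _ (by norm_num)]
        omega
      rw [hidx]
      exact ih acc' (r + 1) 0 (by omega) le_rfl (by omega)
    · rw [if_neg hcr1]
      have hidx : PySem.Int.floordiv (r * (r - 1)) 2 + c + 1
          = PySem.Int.floordiv (r * (r - 1)) 2 + (c + 1) := by omega
      rw [hidx]
      exact ih acc' r (c + 1) hr (by omega) (by omega)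

-- ===== VERDICT (by name: the statement is the Claim_ definition above) =====
theorem deleteSetOfCandidate_spec : Claim_equal_deleteSetOfCandidate := by
  intro score_list indicies _
  unfold Spec_deleteSetOfCandidate deleteSetOfCandidate deleteSetOfCandidate_alt
  have h := fold_eq indicies score_list [] 1 0 (by norm_num) le_rfl (by norm_num)
  simpa using h
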